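-- pv_equiv track=rewrite | github.com/DependableSystemsLab/Artinali | Invariant-Inf/DEMiner.py | FindFrequentitemSet
-- ===== SOURCE A (Python) =====
-- def FindFrequentitemSet(A,B):
--     #A=[['Event:send()', 'd1=true', 'd2=all_data', 'd3=time_out'], ['Event:recv()', 'd1=false', 'd2=nil', 'd3=closed'], ['Event:read()', 'd1=true', 'd5=5', 'd6=8.5']]
--     # B=[['Event:send()', 'd1=true', 'd2=all_data', 'd3=time_out'], ['Event:recv()', 'd1=false', 'd2=abc , d2=nil', 'd3=closed']]
--     AA=[]
--     BB=[]
--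
--     for m in range (0, len(A)):
--         for n in range (0 , len (B)):
--             if A[m][0]==B[n][0]:
--                 AA.append(A[m])
--                 BB.append(B[n])
--     return AA, BB
-- ===== SOURCE B (Python) =====
-- def FindFrequentitemSet(A, B):
--     if not A or not B:
--         return [], []
--     index = {}
--     for row in B:
--         index.setdefault(row[0], []).append(row)
--     AA = []
--     BB = []
--     for row in A:
--         for match in index.get(row[0], []):
--             AA.append(row)
--             BB.append(match)
--     return AA, BB
-- ===== Notes on version B (the rewrite author's own statement) =====
-- stated objective: alternative
-- what changed: replaces the nested scan of B for every row of A by a dict that groups B's rows by their first element once, then a single pass over A with O(1) lookups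
import Mathlib
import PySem

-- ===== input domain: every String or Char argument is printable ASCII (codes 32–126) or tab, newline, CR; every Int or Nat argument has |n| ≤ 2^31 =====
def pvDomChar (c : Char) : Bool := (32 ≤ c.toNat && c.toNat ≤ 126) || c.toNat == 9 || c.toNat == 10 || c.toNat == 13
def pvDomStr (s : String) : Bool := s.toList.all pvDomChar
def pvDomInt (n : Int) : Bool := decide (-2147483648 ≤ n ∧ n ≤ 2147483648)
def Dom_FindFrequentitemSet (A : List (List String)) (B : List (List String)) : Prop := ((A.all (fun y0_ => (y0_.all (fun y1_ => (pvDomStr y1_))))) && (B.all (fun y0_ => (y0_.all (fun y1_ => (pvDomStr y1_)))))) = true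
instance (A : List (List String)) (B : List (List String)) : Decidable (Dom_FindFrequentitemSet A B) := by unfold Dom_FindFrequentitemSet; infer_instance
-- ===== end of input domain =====

-- B replaces A's rescan of B for every row of A by a dict grouping B's rows by first
-- element built once, then a single pass over A with lookups (objective: alternative).

-- ===== PORT A =====
-- nested index loops 'for m in range(len(A)): for n in range(len(B)): if A[m][0]==B[n][0]: append both'
-- row[0] is ported as pyGetD row 0 ""; exact under Pre_ (all indexed rows nonempty there)
def FindFrequentitemSet (A : List (List String)) (B : List (List String)) : List (List String) × List (List String) :=
  (PySem.List.pyRange 0 (A.length : Int) 1).foldl (fun acc m =>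
    (PySem.List.pyRange 0 (B.length : Int) 1).foldl (fun acc n =>
      if PySem.List.pyGetD (PySem.List.pyGetD A m []) 0 "" ==
         PySem.List.pyGetD (PySem.List.pyGetD B n []) 0 "" then
        (acc.1 ++ [PySem.List.pyGetD A m []], acc.2 ++ [PySem.List.pyGetD B n []])
      else acc) acc) ([], [])

-- ===== PORT B =====
-- index.setdefault(row[0], []).append(row) = insert at the key its extended group (overwrite keeps position)
def FindFrequentitemSet_alt (A : List (List String)) (B : List (List String)) : List (List String) × List (List String) :=
  if A = [] ∨ B = [] then ([], [])
  else
    let index : PySem.Dict String (List (List String)) :=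
      B.foldl (fun d row =>
        d.insert (PySem.List.pyGetD row 0 "") (d.getD (PySem.List.pyGetD row 0 "") [] ++ [row]))
        PySem.Dict.empty
    A.foldl (fun acc row =>
      (index.getD (PySem.List.pyGetD row 0 "") []).foldl
        (fun acc b => (acc.1 ++ [row], acc.2 ++ [b])) acc) ([], [])

-- ===== PRECONDITION & SPEC =====
-- Pre_ excludes exactly the inputs where Python A raises IndexError: when both lists are
-- nonempty, every row of A and of B is indexed at 0, so all rows must be nonempty.
def Pre_FindFrequentitemSet (A : List (List String)) (B : List (List String)) : Prop :=
  A = [] ∨ B = [] ∨ ((∀ r ∈ A, r ≠ []) ∧ (∀ r ∈ B, r ≠ []))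
instance (A : List (List String)) (B : List (List String)) : Decidable (Pre_FindFrequentitemSet A B) := by unfold Pre_FindFrequentitemSet; infer_instance

def pvWitness_FindFrequentitemSet : List (List String) × List (List String) :=
  ([["Event:send()", "d1=true"], ["Event:recv()", "d1=false"]], [["Event:send()", "d2=nil"]])

def Spec_FindFrequentitemSet (A : List (List String)) (B : List (List String)) (out : List (List String) × List (List String)) : Prop := out = FindFrequentitemSet_alt A B
instance (A : List (List String)) (B : List (List String)) (out : List (List String) × List (List String)) : Decidable (Spec_FindFrequentitemSet A B out) := by unfold Spec_FindFrequentitemSet; infer_instance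

-- ===== CLAIM (what is proved, stated in full; the proofs are below) =====
def Claim_equal_FindFrequentitemSet : Prop := ∀ (A : List (List String)) (B : List (List String)), Dom_FindFrequentitemSet A B → Pre_FindFrequentitemSet A B → Spec_FindFrequentitemSet A B (FindFrequentitemSet A B)

-- ===== LEMMAS AND PROOFS =====

-- the key of a row, as both ports compute it
def pvKey (r : List String) : String := PySem.List.pyGetD r 0 ""

-- common form both ports reduce to
def pvCF (A : List (List String)) (B : List (List String)) : List (List String) × List (List String) :=
  A.foldl (fun acc a =>
    (acc.1 ++ (B.filter (fun r => pvKey a == pvKey r)).map (fun _ => a),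
     acc.2 ++ B.filter (fun r => pvKey a == pvKey r))) ([], [])

-- B's dict after the grouping pass: lookup at k is the k-keyed rows of B, in order
lemma pv_group (Bs : List (List String)) (d : PySem.Dict String (List (List String))) (k : String) :
    (Bs.foldl (fun d row => d.insert (pvKey row) (d.getD (pvKey row) [] ++ [row])) d).getD k []
      = d.getD k [] ++ Bs.filter (fun r => pvKey r == k) := by
  induction Bs generalizing d with
  | nil => simp
  | cons r Bs ih =>
    simp only [List.foldl_cons, List.filter_cons]
    rw [ih]
    by_cases h : pvKey r = k
    · subst h
      rw [PySem.Dict.getD_insert_self]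
      simp
    · rw [PySem.Dict.getD_insert_of_ne _ _ _ (Ne.symm h)]
      simp [h]

-- the unconditional pair-appending loop (B's inner loop)
lemma pv_pairs (a : List String) (xs : List (List String)) (acc : List (List String) × List (List String)) :
    xs.foldl (fun acc b => (acc.1 ++ [a], acc.2 ++ [b])) acc
      = (acc.1 ++ xs.map (fun _ => a), acc.2 ++ xs) := by
  induction xs generalizing acc with
  | nil => simp
  | cons x xs ih => simp [ih]

-- the filtered pair-appending loop (A's inner loop)
lemma pv_pairs_if (a : List String) (p : List String → Bool) (xs : List (List String)) (acc : List (List String) × List (List String)) :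
    xs.foldl (fun acc b => if p b then (acc.1 ++ [a], acc.2 ++ [b]) else acc) acc
      = (acc.1 ++ (xs.filter p).map (fun _ => a), acc.2 ++ xs.filter p) := by
  induction xs generalizing acc with
  | nil => simp
  | cons x xs ih =>
    simp only [List.foldl_cons, List.filter_cons]
    by_cases h : p x = true
    · simp [h, ih]
    · simp [h, ih]

lemma pv_lhs (A B : List (List String)) : FindFrequentitemSet A B = pvCF A B := by
  unfold FindFrequentitemSet pvCF
  rw [PySem.List.foldl_pyRange_zero_pyGetD' A ([] : List String)
    (fun acc a => (PySem.List.pyRange 0 (B.length : Int) 1).foldl (fun acc n =>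
      if PySem.List.pyGetD a 0 "" == PySem.List.pyGetD (PySem.List.pyGetD B n []) 0 "" then
        (acc.1 ++ [a], acc.2 ++ [PySem.List.pyGetD B n []])
      else acc) acc) ([], [])]
  apply PySem.List.foldl_congr_mem
  intro acc a _
  rw [PySem.List.foldl_pyRange_zero_pyGetD' B ([] : List String)
    (fun acc bn => if PySem.List.pyGetD a 0 "" == PySem.List.pyGetD bn 0 "" then
      (acc.1 ++ [a], acc.2 ++ [bn]) else acc) acc]
  exact pv_pairs_if a (fun bn => pvKey a == pvKey bn) B acc

lemma pv_foldl_id (l : List (List String)) (acc : List (List String) × List (List String)) :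
    l.foldl (fun a _ => a) acc = acc := by
  induction l generalizing acc with
  | nil => rfl
  | cons x l ih => exact ih acc

lemma pv_rhs (A B : List (List String)) : FindFrequentitemSet_alt A B = pvCF A B := by
  unfold FindFrequentitemSet_alt pvCF
  by_cases hA : A = []
  · simp [hA]
  by_cases hB : B = []
  · simp only [hB, or_true, if_true, List.filter_nil, List.map_nil, List.append_nil]
    symm
    rw [List.foldl_ext _ (fun a _ => a) ([], []) (fun acc a _ => rfl)]
    exact pv_foldl_id A ([], [])
  simp only [hA, hB, or_self, if_false]
  apply PySem.List.foldl_congr_mem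
  intro acc a _
  have hg := pv_group B PySem.Dict.empty (pvKey a)
  simp only [pvKey] at hg
  rw [hg]
  have hempty : (PySem.Dict.empty : PySem.Dict String (List (List String))).getD (PySem.List.pyGetD a 0 "") [] = [] := rfl
  rw [hempty, List.nil_append, pv_pairs]
  have hfilter : B.filter (fun r => PySem.List.pyGetD r 0 "" == PySem.List.pyGetD a 0 "")
      = B.filter (fun r => pvKey a == pvKey r) :=
    List.filter_congr (fun r _ => BEq.comm ..)
  rw [hfilter]

-- ===== VERDICT (by name: the statement is the Claim_ definition above) =====
theorem FindFrequentitemSet_spec : Claim_equal_FindFrequentitemSet := by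
  intro A B _ _
  show FindFrequentitemSet A B = FindFrequentitemSet_alt A B
  rw [pv_lhs, pv_rhs]
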